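-- pv_equiv track=rewrite | github.com/ml703852/2048 | main.py | shift_down
-- ===== SOURCE A (Python) =====
-- def shift_down(game_board):
--     new_board = []
--     for row in range(0,4):
--         new_board.append([0] * 4)
--
--     for column in range(0,4):
--         pos = 3
--         for row in reversed(range(0,4)):
--             if game_board[row][column] != 0:
--                 new_board[pos][column] = game_board[row][column]
--                 pos -= 1
--     return new_board
-- ===== SOURCE B (Python) =====
-- def shift_down(game_board):
--     cols = []
--     for c in range(4):
--         vals = [game_board[r][c] for r in range(4) if game_board[r][c] != 0]
--         cols.append([0] * (4 - len(vals)) + vals)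
--     return [[cols[c][r] for c in range(4)] for r in range(4)]
-- ===== Notes on version B (the rewrite author's own statement) =====
-- stated objective: simpler
-- what changed: B gathers each column's non-zero values in one forward pass and builds the whole bottom-packed column by zero-padding and concatenation (then transposes into rows), instead of A's reverse scan over a mutable zero board with a decrementing write pointer.
import Mathlib
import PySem

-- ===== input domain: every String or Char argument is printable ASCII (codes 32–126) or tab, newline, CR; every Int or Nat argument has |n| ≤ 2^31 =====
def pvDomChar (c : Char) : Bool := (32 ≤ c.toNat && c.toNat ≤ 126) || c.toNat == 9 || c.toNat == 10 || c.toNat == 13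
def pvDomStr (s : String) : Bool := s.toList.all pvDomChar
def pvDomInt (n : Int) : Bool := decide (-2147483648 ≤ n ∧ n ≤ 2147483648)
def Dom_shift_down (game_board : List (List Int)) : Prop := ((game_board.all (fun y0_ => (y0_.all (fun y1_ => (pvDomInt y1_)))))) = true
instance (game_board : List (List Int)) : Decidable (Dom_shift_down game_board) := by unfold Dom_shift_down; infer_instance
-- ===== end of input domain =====

-- B builds each bottom-packed column by gather + zero-pad + concatenation and transposes,
-- instead of A's reverse scan writing through a decrementing pointer into a mutable board.

-- ===== PORT A =====
-- inner loop of A for one column: reversed(range(0,4)) scan with write pointer pos;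
-- game_board[row][column] is ported as getD/getD, exact under Pre_ (indices 0..3 in range).
def aColStep (game_board : List (List Int)) (column : Nat)
    (st : List (List Int) × Nat) (row : Nat) : List (List Int) × Nat :=
  let v := (game_board.getD row []).getD column 0
  if v ≠ 0 then
    (st.1.set st.2 ((st.1.getD st.2 []).set column v), st.2 - 1)
  else st

def aCol (game_board : List (List Int)) (column : Nat) (nb : List (List Int)) : List (List Int) :=
  (((List.range 4).reverse).foldl (aColStep game_board column) (nb, 3)).1

def shift_down (game_board : List (List Int)) : List (List Int) :=
  let new_board := (List.range 4).foldl (fun b _ => b ++ [List.replicate 4 (0 : Int)]) []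
  (List.range 4).foldl (fun nb column => aCol game_board column nb) new_board

-- ===== PORT B =====
-- one bottom-packed column: non-zero values in forward row order, zero-padded on top.
def bCol (game_board : List (List Int)) (c : Nat) : List Int :=
  let vals := (List.range 4).filterMap (fun r =>
    let v := (game_board.getD r []).getD c 0
    if v ≠ 0 then some v else none)
  List.replicate (4 - vals.length) 0 ++ vals

def shift_down_alt (game_board : List (List Int)) : List (List Int) :=
  let cols := (List.range 4).map (fun c => bCol game_board c)
  (List.range 4).map (fun r => (List.range 4).map (fun c => (cols.getD c []).getD r 0))

-- ===== PRECONDITION & SPEC =====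
-- Pre_ excludes exactly the boards on which Python A raises IndexError:
-- fewer than 4 rows, or one of the first 4 rows has fewer than 4 entries.
def Pre_shift_down (game_board : List (List Int)) : Prop :=
  4 ≤ game_board.length ∧ ∀ row ∈ game_board.take 4, 4 ≤ row.length
instance (game_board : List (List Int)) : Decidable (Pre_shift_down game_board) := by
  unfold Pre_shift_down; infer_instance
def pvWitness_shift_down : List (List Int) :=
  [[2, 0, 0, 2], [0, 4, 0, 0], [2, 0, 0, 0], [2, 0, 8, 0]]

def Spec_shift_down (game_board : List (List Int)) (out : List (List Int)) : Prop :=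
  out = shift_down_alt game_board
instance (game_board : List (List Int)) (out : List (List Int)) :
    Decidable (Spec_shift_down game_board out) := by unfold Spec_shift_down; infer_instance

-- ===== CLAIM (what is proved, stated in full; the proofs are below) =====
def Claim_equal_shift_down : Prop := ∀ (game_board : List (List Int)),
  Dom_shift_down game_board → Pre_shift_down game_board →
  Spec_shift_down game_board (shift_down game_board)

-- ===== LEMMAS AND PROOFS =====

lemma aCol0 (gb : List (List Int)) (a1 a2 a3 b1 b2 b3 c1 c2 c3 d1 d2 d3 : Int) :
    aCol gb 0 [[0, a1, a2, a3], [0, b1, b2, b3], [0, c1, c2, c3], [0, d1, d2, d3]] =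
      [[(bCol gb 0).getD 0 0, a1, a2, a3], [(bCol gb 0).getD 1 0, b1, b2, b3],
       [(bCol gb 0).getD 2 0, c1, c2, c3], [(bCol gb 0).getD 3 0, d1, d2, d3]] := by
  by_cases h0 : ((gb[0]?.getD [])[0]?.getD 0 : Int) = 0 <;>
  by_cases h1 : ((gb[1]?.getD [])[0]?.getD 0 : Int) = 0 <;>
  by_cases h2 : ((gb[2]?.getD [])[0]?.getD 0 : Int) = 0 <;>
  by_cases h3 : ((gb[3]?.getD [])[0]?.getD 0 : Int) = 0 <;>
  simp [aCol, aColStep, bCol, List.range_succ, h0, h1, h2, h3]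

lemma aCol1 (gb : List (List Int)) (a0 a2 a3 b0 b2 b3 c0 c2 c3 d0 d2 d3 : Int) :
    aCol gb 1 [[a0, 0, a2, a3], [b0, 0, b2, b3], [c0, 0, c2, c3], [d0, 0, d2, d3]] =
      [[a0, (bCol gb 1).getD 0 0, a2, a3], [b0, (bCol gb 1).getD 1 0, b2, b3],
       [c0, (bCol gb 1).getD 2 0, c2, c3], [d0, (bCol gb 1).getD 3 0, d2, d3]] := by
  by_cases h0 : ((gb[0]?.getD [])[1]?.getD 0 : Int) = 0 <;>
  by_cases h1 : ((gb[1]?.getD [])[1]?.getD 0 : Int) = 0 <;>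
  by_cases h2 : ((gb[2]?.getD [])[1]?.getD 0 : Int) = 0 <;>
  by_cases h3 : ((gb[3]?.getD [])[1]?.getD 0 : Int) = 0 <;>
  simp [aCol, aColStep, bCol, List.range_succ, h0, h1, h2, h3]

lemma aCol2 (gb : List (List Int)) (a0 a1 a3 b0 b1 b3 c0 c1 c3 d0 d1 d3 : Int) :
    aCol gb 2 [[a0, a1, 0, a3], [b0, b1, 0, b3], [c0, c1, 0, c3], [d0, d1, 0, d3]] =
      [[a0, a1, (bCol gb 2).getD 0 0, a3], [b0, b1, (bCol gb 2).getD 1 0, b3],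
       [c0, c1, (bCol gb 2).getD 2 0, c3], [d0, d1, (bCol gb 2).getD 3 0, d3]] := by
  by_cases h0 : ((gb[0]?.getD [])[2]?.getD 0 : Int) = 0 <;>
  by_cases h1 : ((gb[1]?.getD [])[2]?.getD 0 : Int) = 0 <;>
  by_cases h2 : ((gb[2]?.getD [])[2]?.getD 0 : Int) = 0 <;>
  by_cases h3 : ((gb[3]?.getD [])[2]?.getD 0 : Int) = 0 <;>
  simp [aCol, aColStep, bCol, List.range_succ, h0, h1, h2, h3]

lemma aCol3 (gb : List (List Int)) (a0 a1 a2 b0 b1 b2 c0 c1 c2 d0 d1 d2 : Int) :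
    aCol gb 3 [[a0, a1, a2, 0], [b0, b1, b2, 0], [c0, c1, c2, 0], [d0, d1, d2, 0]] =
      [[a0, a1, a2, (bCol gb 3).getD 0 0], [b0, b1, b2, (bCol gb 3).getD 1 0],
       [c0, c1, c2, (bCol gb 3).getD 2 0], [d0, d1, d2, (bCol gb 3).getD 3 0]] := by
  by_cases h0 : ((gb[0]?.getD [])[3]?.getD 0 : Int) = 0 <;>
  by_cases h1 : ((gb[1]?.getD [])[3]?.getD 0 : Int) = 0 <;>
  by_cases h2 : ((gb[2]?.getD [])[3]?.getD 0 : Int) = 0 <;>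
  by_cases h3 : ((gb[3]?.getD [])[3]?.getD 0 : Int) = 0 <;>
  simp [aCol, aColStep, bCol, List.range_succ, h0, h1, h2, h3]

-- ===== VERDICT (by name: the statement is the Claim_ definition above) =====
theorem shift_down_spec : Claim_equal_shift_down := by
  intro gb _ _
  show shift_down gb = shift_down_alt gb
  have h : shift_down gb =
      aCol gb 3 (aCol gb 2 (aCol gb 1 (aCol gb 0
        [[0, 0, 0, 0], [0, 0, 0, 0], [0, 0, 0, 0], [0, 0, 0, 0]]))) := rfl
  rw [h, aCol0, aCol1, aCol2, aCol3]
  rfl
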